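-- pv_equiv track=rewrite | github.com/adrianbenitezrueda/borednomore | streamlit_app.py | obtener_bloque_tiempo
-- ===== SOURCE A (Python) =====
-- def obtener_bloque_tiempo(hora_actual):
--     bloques = [
--         (0, 6),
--         (6, 12),
--         (12, 18),
--         (18, 24)
--     ]
--     for inicio, fin in bloques:
--         if inicio <= hora_actual < fin:
--             return f"{inicio:02d}-{fin:02d}"
--     return None
-- ===== SOURCE B (Python) =====
-- def obtener_bloque_tiempo(hora_actual):
--     if 0 <= hora_actual < 24:
--         inicio = int(hora_actual // 6) * 6
--         return f"{inicio:02d}-{inicio + 6:02d}"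
--     return None
-- ===== Notes on version B (the rewrite author's own statement) =====
-- stated objective: simpler
-- what changed: Replaces the list of (start,end) ranges and the linear scan with a direct arithmetic computation of the 6-hour block via floor division.
import Mathlib
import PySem

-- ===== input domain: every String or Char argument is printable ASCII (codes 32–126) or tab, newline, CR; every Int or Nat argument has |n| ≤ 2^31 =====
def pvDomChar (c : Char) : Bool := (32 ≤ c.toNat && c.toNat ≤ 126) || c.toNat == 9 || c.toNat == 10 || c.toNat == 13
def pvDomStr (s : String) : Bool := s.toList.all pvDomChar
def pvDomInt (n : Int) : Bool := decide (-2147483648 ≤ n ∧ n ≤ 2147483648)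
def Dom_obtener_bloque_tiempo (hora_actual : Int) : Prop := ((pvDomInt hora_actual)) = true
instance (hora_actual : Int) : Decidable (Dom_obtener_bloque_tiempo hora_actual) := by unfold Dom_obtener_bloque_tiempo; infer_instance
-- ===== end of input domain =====

-- B replaces A's list of ranges and linear scan by direct floor-division arithmetic (simpler).

-- f"{x:02d}" for the nonnegative values used here: pad with '0' to width 2
def pvFmt02 (x : Int) : String :=
  let s := PySem.Int.toStr x
  if PySem.Str.len s < 2 then String.append "0" s else s

-- ===== PORT A =====
-- the for-loop over 'bloques'
def pvLoopA : List (Int × Int) → Int → Option String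
  | [], _ => none
  | (inicio, fin) :: rest, h =>
      if inicio ≤ h ∧ h < fin then
        some (String.append (String.append (pvFmt02 inicio) "-") (pvFmt02 fin))
      else pvLoopA rest h

def obtener_bloque_tiempo (hora_actual : Int) : Option String :=
  let bloques : List (Int × Int) := [(0, 6), (6, 12), (12, 18), (18, 24)]
  pvLoopA bloques hora_actual

-- ===== PORT B =====
def obtener_bloque_tiempo_alt (hora_actual : Int) : Option String :=
  if 0 ≤ hora_actual ∧ hora_actual < 24 then
    let inicio := PySem.Int.floordiv hora_actual 6 * 6
    some (String.append (String.append (pvFmt02 inicio) "-") (pvFmt02 (inicio + 6)))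
  else none

-- ===== PRECONDITION & SPEC =====
def Spec_obtener_bloque_tiempo (hora_actual : Int) (out : Option String) : Prop := out = obtener_bloque_tiempo_alt hora_actual
instance (hora_actual : Int) (out : Option String) : Decidable (Spec_obtener_bloque_tiempo hora_actual out) := by unfold Spec_obtener_bloque_tiempo; infer_instance

-- ===== CLAIM (what is proved, stated in full; the proofs are below) =====
def Claim_equal_obtener_bloque_tiempo : Prop := ∀ (hora_actual : Int), Dom_obtener_bloque_tiempo hora_actual → Spec_obtener_bloque_tiempo hora_actual (obtener_bloque_tiempo hora_actual)

-- ===== LEMMAS AND PROOFS =====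
-- ===== VERDICT (by name: the statement is the Claim_ definition above) =====
theorem obtener_bloque_tiempo_spec : Claim_equal_obtener_bloque_tiempo := by
  intro h _
  unfold Spec_obtener_bloque_tiempo
  by_cases hin : 0 ≤ h ∧ h < 24
  · obtain ⟨hlo, hhi⟩ := hin
    interval_cases h <;> decide
  · have e : obtener_bloque_tiempo_alt h = none := by
      simp [obtener_bloque_tiempo_alt, hin]
    rw [e]
    simp only [obtener_bloque_tiempo, pvLoopA]
    have : ¬ (0 ≤ h ∧ h < 24) := hin
    split_ifs with c1 c2 c3 c4 <;> first | rfl | omega
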